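-- pv_equiv track=rewrite | github.com/emarberg/schurp | keys.py | symmetric_halves
-- ===== SOURCE A (Python) =====
-- def symmetric_halves(alpha, pad=False):
--     def s(i):
--         def f(x):
--             return (x + 1) if x == i else (x - 1) if x == i + 1 else x
--         return f
--
--     word = sorting_permutation(alpha)
--     mu = sorted(alpha, reverse=True)
--     diagram = {(i, j) for i in range(1, 1 + len(mu)) for j in range(1, 1 + mu[i - 1])}
--     for i in reversed(word):
--         diagram = {(s(i)(a), s(i)(b)) for (a, b) in diagram}
--     n = max([0] + [max(p) for p in diagram])
--     rows, cols = n * [0], n * [0]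
--     for a, b in diagram:
--         if a <= b:
--             rows[a - 1] += 1
--             cols[b - 1] += 1
--     while rows and rows[-1] == 0:
--         rows = rows[:-1]
--     while cols and cols[-1] == 0:
--         cols = cols[:-1]
--     a, b = tuple(rows), tuple(cols)
--
--     if pad:
--         n = len(alpha)
--         a += (n - len(a)) * (0,)
--         b += (n - len(b)) * (0,)
--     return a, b
--
-- def sorting_permutation(weak_comp):
--     word = []
--     n = len(weak_comp)
--     weak_comp = list(weak_comp)
--     for i in range(n):
--         for j in range(i, 0, -1):
--             if weak_comp[j] > weak_comp[j - 1]: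
--                 word += [j]
--                 weak_comp[j - 1], weak_comp[j] = weak_comp[j], weak_comp[j - 1]
--     return tuple(word)
-- ===== SOURCE B (Python) =====
-- def sorting_permutation(weak_comp):
--     word = []
--     n = len(weak_comp)
--     weak_comp = list(weak_comp)
--     for i in range(n):
--         for j in range(i, 0, -1):
--             if weak_comp[j] > weak_comp[j - 1]:
--                 word += [j]
--                 weak_comp[j - 1], weak_comp[j] = weak_comp[j], weak_comp[j - 1]
--     return tuple(word)
--
--
-- def symmetric_halves(alpha, pad=False):
--     n = len(alpha)
--     mu = sorted(alpha, reverse=True)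
--     word = sorting_permutation(alpha)
--     # compose all adjacent transpositions into ONE permutation P (P[x-1] = image of x)
--     P = list(range(1, n + 1))
--     for i in word:
--         P[i - 1], P[i] = P[i], P[i - 1]
--     # apply P to each staircase cell of mu once, counting the symmetric halves directly
--     rows = {}
--     cols = {}
--     for i in range(1, n + 1):
--         a = P[i - 1]
--         for j in range(1, 1 + mu[i - 1]):
--             b = P[j - 1] if j <= n else j
--             if a <= b:
--                 rows[a] = rows.get(a, 0) + 1
--                 cols[b] = cols.get(b, 0) + 1
--     ra = max(rows) if rows else 0
--     ca = max(cols) if cols else 0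
--     a = tuple(rows.get(k, 0) for k in range(1, ra + 1))
--     b = tuple(cols.get(k, 0) for k in range(1, ca + 1))
--     if pad:
--         a += (n - len(a)) * (0,)
--         b += (n - len(b)) * (0,)
--     return a, b
-- ===== Notes on version B (the rewrite author's own statement) =====
-- stated objective: faster
-- what changed: Instead of rebuilding the whole cell set once per letter of the sorting word, B composes all adjacent transpositions of the word into a single permutation array and applies it to each staircase cell exactly once, counting row/column halves directly into dictionaries.
import Mathlib
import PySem

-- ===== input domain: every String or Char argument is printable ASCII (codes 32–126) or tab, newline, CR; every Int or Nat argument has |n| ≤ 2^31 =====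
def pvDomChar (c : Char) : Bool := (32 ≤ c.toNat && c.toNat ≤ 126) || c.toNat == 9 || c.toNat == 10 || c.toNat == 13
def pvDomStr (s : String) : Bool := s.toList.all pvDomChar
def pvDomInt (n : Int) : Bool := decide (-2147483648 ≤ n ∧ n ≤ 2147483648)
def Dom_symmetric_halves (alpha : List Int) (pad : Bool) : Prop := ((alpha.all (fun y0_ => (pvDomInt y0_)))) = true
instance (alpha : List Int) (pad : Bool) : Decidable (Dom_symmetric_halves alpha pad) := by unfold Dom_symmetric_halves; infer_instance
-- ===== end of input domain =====

-- B composes the sorting word into one permutation and applies it to every staircase cell once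
-- (asymptotically faster than A's per-letter rebuild of the whole cell set); return values proved equal.

-- ===== PORT A =====
-- local closure s(i) of A
def pv_s (i x : Int) : Int := if x = i then x + 1 else if x = i + 1 then x - 1 else x

-- helper sorting_permutation of the module (used by both A and B); all list indices
-- are provably in range, so List.getD/List.set are exact for Python's wc[j] reads/writes
def sorting_permutation (weak_comp : List Int) : List Int :=
  ((List.range weak_comp.length).foldl
    (fun st i =>
      ((List.range i).reverse).foldl
        (fun (st : List Int × List Int) j' =>
          let j := j' + 1
          let wj := st.2.getD j 0
          let wj1 := st.2.getD (j - 1) 0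
          if wj1 < wj then
            (st.1 ++ [(j : Int)], (st.2.set (j - 1) wj).set j wj1)
          else st)
        st)
    ([], weak_comp)).1

-- the staircase {(i, j) : 1 ≤ i ≤ len(mu), 1 ≤ j ≤ mu[i-1]} as the generator's list
def pvStaircase (mu : List Int) : List (Int × Int) :=
  (List.range mu.length).flatMap
    (fun i0 => (PySem.List.pyRange 1 (1 + mu.getD i0 0) 1).map (fun j => ((i0 + 1 : Int), j)))

-- rows[k] += 1 (index provably in range, so pyGetD/pySetD are exact)
def pvIncr (l : List Int) (k : Int) : List Int :=
  PySem.List.pySetD l k (PySem.List.pyGetD l k 0 + 1)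

-- the two 'while … and …[-1] == 0: drop last' loops: recursion over the reversed list
def pvTrim (l : List Int) : List Int := (l.reverse.dropWhile (fun x => x == 0)).reverse

def symmetric_halves (alpha : List Int) (pad : Bool) : List Int × List Int :=
  let word := sorting_permutation alpha
  let mu := PySem.List.sorted alpha (fun x => x) true
  let diagram0 : PySem.Set (Int × Int) := PySem.Set.ofList (pvStaircase mu)
  let diagram := word.reverse.foldl
      (fun d i => PySem.Set.ofList (d.map (fun p => (pv_s i p.1, pv_s i p.2)))) diagram0
  let n : Int := (PySem.List.max? ((0 : Int) :: diagram.map (fun p => max p.1 p.2)) (fun x => x)).getD 0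
  let rc := diagram.foldl
      (fun (rc : List Int × List Int) p =>
        if p.1 ≤ p.2 then (pvIncr rc.1 (p.1 - 1), pvIncr rc.2 (p.2 - 1)) else rc)
      (List.replicate n.toNat 0, List.replicate n.toNat 0)
  let a := pvTrim rc.1
  let b := pvTrim rc.2
  if pad then
    (a ++ List.replicate (alpha.length - a.length) 0,
     b ++ List.replicate (alpha.length - b.length) 0)
  else (a, b)

-- ===== PORT B =====
def symmetric_halves_alt (alpha : List Int) (pad : Bool) : List Int × List Int :=
  let n := alpha.length
  let mu := PySem.List.sorted alpha (fun x => x) true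
  let word := sorting_permutation alpha
  let P := word.foldl
      (fun P i =>
        let a := PySem.List.pyGetD P (i - 1) 0
        let b := PySem.List.pyGetD P i 0
        PySem.List.pySetD (PySem.List.pySetD P (i - 1) b) i a)
      (PySem.List.pyRange 1 ((n : Int) + 1) 1)
  let rc := (PySem.List.pyRange 1 ((n : Int) + 1) 1).foldl
      (fun (rc : PySem.Dict Int Int × PySem.Dict Int Int) i =>
        let a := PySem.List.pyGetD P (i - 1) 0
        (PySem.List.pyRange 1 (1 + PySem.List.pyGetD mu (i - 1) 0) 1).foldl
          (fun rc j =>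
            let b := if j ≤ (n : Int) then PySem.List.pyGetD P (j - 1) 0 else j
            if a ≤ b then (rc.1.modify a 0 (· + 1), rc.2.modify b 0 (· + 1)) else rc)
          rc)
      (PySem.Dict.empty, PySem.Dict.empty)
  let ra : Int := if rc.1.size = 0 then 0 else (PySem.List.max? rc.1.keys (fun x => x)).getD 0
  let ca : Int := if rc.2.size = 0 then 0 else (PySem.List.max? rc.2.keys (fun x => x)).getD 0
  let ta := (PySem.List.pyRange 1 (ra + 1) 1).map (fun k => rc.1.getD k 0)
  let tb := (PySem.List.pyRange 1 (ca + 1) 1).map (fun k => rc.2.getD k 0)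
  if pad then
    (ta ++ List.replicate (n - ta.length) 0, tb ++ List.replicate (n - tb.length) 0)
  else (ta, tb)

-- ===== PRECONDITION & SPEC =====
def Spec_symmetric_halves (alpha : List Int) (pad : Bool) (out : List Int × List Int) : Prop := out = symmetric_halves_alt alpha pad
instance (alpha : List Int) (pad : Bool) (out : List Int × List Int) : Decidable (Spec_symmetric_halves alpha pad out) := by unfold Spec_symmetric_halves; infer_instance

-- ===== CLAIM (what is proved, stated in full; the proofs are below) =====
def Claim_equal_symmetric_halves : Prop := ∀ (alpha : List Int) (pad : Bool), Dom_symmetric_halves alpha pad → Spec_symmetric_halves alpha pad (symmetric_halves alpha pad)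

-- ===== LEMMAS AND PROOFS =====

-- the value-wise composition of the transpositions of r, earliest applied first
def pvF (r : List Int) (x : Int) : Int := r.foldl (fun v i => pv_s i v) x

theorem pv_s_inj (i : Int) : Function.Injective (pv_s i) := by
  intro x y h
  unfold pv_s at h
  split_ifs at h <;> omega

theorem pvF_cons (i : Int) (r : List Int) (x : Int) : pvF (i :: r) x = pvF r (pv_s i x) := rfl

-- the fold of set-images is the image under the composed map
theorem set_fold_eq_map (r : List Int) (L : List (Int × Int)) (hL : L.Nodup) :
    r.foldl (fun d i => PySem.Set.ofList (d.map (fun p => (pv_s i p.1, pv_s i p.2))))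
      (PySem.Set.ofList L)
    = L.map (fun p => (pvF r p.1, pvF r p.2)) := by
  induction r generalizing L with
  | nil => simpa [pvF] using PySem.Set.ofList_eq_self_of_nodup L hL
  | cons i r ih =>
    have hinj : Function.Injective (fun p : Int × Int => (pv_s i p.1, pv_s i p.2)) := by
      intro p q h
      simp only [Prod.mk.injEq] at h
      exact Prod.ext (pv_s_inj i h.1) (pv_s_inj i h.2)
    have hnd : (L.map (fun p : Int × Int => (pv_s i p.1, pv_s i p.2))).Nodup := hL.map hinj
    rw [List.foldl_cons, PySem.Set.ofList_eq_self_of_nodup L hL, ih _ hnd]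
    simp [pvF, List.map_map, Function.comp_def]

-- ---------- canonical middle form ----------

-- the final cell list: the staircase of mu pushed through the composed permutation
def pvCells (alpha : List Int) : List (Int × Int) :=
  (pvStaircase (PySem.List.sorted alpha (fun x => x) true)).map
    (fun p => (pvF (sorting_permutation alpha).reverse p.1,
               pvF (sorting_permutation alpha).reverse p.2))

def pvKs (alpha : List Int) (sel : (Int × Int) → Int) : List Int :=
  ((pvCells alpha).filter (fun p => p.1 ≤ p.2)).map sel

def pvHalf (ks : List Int) : List Int :=
  (List.range ((PySem.List.max? ks (fun x => x)).getD 0).toNat).map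
    (fun m : Nat => ((ks.count ((m : Int) + 1)) : Int))

def pvOut (alpha : List Int) (pad : Bool) : List Int × List Int :=
  let a := pvHalf (pvKs alpha (fun p => p.1))
  let b := pvHalf (pvKs alpha (fun p => p.2))
  if pad then
    (a ++ List.replicate (alpha.length - a.length) 0,
     b ++ List.replicate (alpha.length - b.length) 0)
  else (a, b)

-- ---------- facts about the word and the composed map ----------

theorem sorting_word_bounds (alpha : List Int) :
    ∀ x ∈ sorting_permutation alpha, 1 ≤ x ∧ x ≤ (alpha.length : Int) - 1 := by
  unfold sorting_permutation
  refine List.foldlRecOn (List.range alpha.length) _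
    (motive := fun st : List Int × List Int =>
      ∀ x ∈ st.1, 1 ≤ x ∧ x ≤ (alpha.length : Int) - 1) (by simp) ?_
  intro st hst i hi
  have hi' : i < alpha.length := List.mem_range.mp hi
  refine List.foldlRecOn _ _ (motive := fun st : List Int × List Int =>
      ∀ x ∈ st.1, 1 ≤ x ∧ x ≤ (alpha.length : Int) - 1) hst ?_
  intro st2 hst2 j' hj'
  have hj'' : j' < i := by
    have := List.mem_reverse.mp hj'
    exact List.mem_range.mp this
  simp only []
  split
  · intro x hx
    rcases List.mem_append.mp hx with h | h
    · exact hst2 x h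
    · have : x = ((j' + 1 : Nat) : Int) := by simpa using h
      subst this
      constructor <;> [push_cast; push_cast] <;> omega
  · exact hst2

theorem pv_s_bounds {n i x : Int} (hi : 1 ≤ i ∧ i ≤ n - 1) (hx : 1 ≤ x ∧ x ≤ n) :
    1 ≤ pv_s i x ∧ pv_s i x ≤ n := by
  unfold pv_s; split_ifs <;> omega

theorem pv_s_fix {n i x : Int} (hi : 1 ≤ i ∧ i ≤ n - 1) (hx : x < 1 ∨ n < x) :
    pv_s i x = x := by
  unfold pv_s; split_ifs <;> omega

theorem pvF_bounds {n : Int} (r : List Int) (hr : ∀ i ∈ r, 1 ≤ i ∧ i ≤ n - 1)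
    {x : Int} (hx : 1 ≤ x ∧ x ≤ n) : 1 ≤ pvF r x ∧ pvF r x ≤ n := by
  induction r generalizing x with
  | nil => exact hx
  | cons i r ih =>
    rw [pvF_cons]
    exact ih (fun j hj => hr j (List.mem_cons_of_mem _ hj))
      (pv_s_bounds (hr i (List.mem_cons_self)) hx)

theorem pvF_fix {n : Int} (r : List Int) (hr : ∀ i ∈ r, 1 ≤ i ∧ i ≤ n - 1)
    {x : Int} (hx : x < 1 ∨ n < x) : pvF r x = x := by
  induction r with
  | nil => rfl
  | cons i r ih =>
    rw [pvF_cons, pv_s_fix (hr i (List.mem_cons_self)) hx]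
    exact ih (fun j hj => hr j (List.mem_cons_of_mem _ hj))

theorem pvF_pos {n : Int} (r : List Int) (hr : ∀ i ∈ r, 1 ≤ i ∧ i ≤ n - 1)
    {x : Int} (hx : 1 ≤ x) : 1 ≤ pvF r x := by
  by_cases h : x ≤ n
  · exact (pvF_bounds r hr ⟨hx, h⟩).1
  · rw [pvF_fix r hr (Or.inr (by omega))]; exact hx

-- ---------- the composed permutation array of port B ----------

theorem swap_getD (n : Nat) (i : Int) (hi : 1 ≤ i ∧ i ≤ (n : Int) - 1)
    (L : List Int) (hL : L.length = n) (x : Int) (h1 : 1 ≤ x) (h2 : x ≤ (n : Int)) :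
    ((L.set (i.toNat - 1) (L.getD i.toNat 0)).set i.toNat (L.getD (i.toNat - 1) 0)).getD (x - 1).toNat 0
      = L.getD ((pv_s i x) - 1).toNat 0 := by
  have hsv : pv_s i x = if x = i then x + 1 else if x = i + 1 then x - 1 else x := rfl
  have hiN : i.toNat < n := by omega
  have hi1N : (i.toNat - 1) < n := by omega
  have hi0 : 1 ≤ i.toNat := by omega
  simp only [List.getD_eq_getElem?_getD]
  by_cases hxi : x = i
  · have e1 : (x - 1).toNat = (i.toNat - 1) := by omega
    rw [e1, List.getElem?_set_ne (by omega), List.getElem?_set_self']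
    rw [hsv, if_pos hxi]
    have e2 : (x + 1 - 1).toNat = i.toNat := by omega
    rw [e2]
    have hsome : L[(i.toNat - 1)]? = some (L[(i.toNat - 1)]'(by omega)) :=
      List.getElem?_eq_getElem (by omega)
    simp [hsome]
  · by_cases hxi1 : x = i + 1
    · have e1 : (x - 1).toNat = i.toNat := by omega
      rw [e1, List.getElem?_set_self']
      rw [hsv, if_neg hxi, if_pos hxi1]
      have e2 : (x - 1 - 1).toNat = (i.toNat - 1) := by omega
      rw [e2]
      have hsome : (L.set (i.toNat - 1) (L[i.toNat]?.getD 0))[i.toNat]? =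
          some ((L.set (i.toNat - 1) (L[i.toNat]?.getD 0))[i.toNat]'(by simp [hL]; omega)) :=
        List.getElem?_eq_getElem (by simp [hL]; omega)
      simp [hsome]
    · rw [List.getElem?_set_ne (by omega), List.getElem?_set_ne (by omega)]
      rw [hsv, if_neg hxi, if_neg hxi1]

theorem P_fold_spec (n : Nat) (w : List Int) (hw : ∀ i ∈ w, 1 ≤ i ∧ i ≤ (n : Int) - 1) :
    (w.foldl
        (fun P i =>
          let a := PySem.List.pyGetD P (i - 1) 0
          let b := PySem.List.pyGetD P i 0
          PySem.List.pySetD (PySem.List.pySetD P (i - 1) b) i a)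
        (PySem.List.pyRange 1 ((n : Int) + 1) 1)).length = n
    ∧ ∀ x : Int, 1 ≤ x → x ≤ (n : Int) →
        PySem.List.pyGetD
          (w.foldl
            (fun P i =>
              let a := PySem.List.pyGetD P (i - 1) 0
              let b := PySem.List.pyGetD P i 0
              PySem.List.pySetD (PySem.List.pySetD P (i - 1) b) i a)
            (PySem.List.pyRange 1 ((n : Int) + 1) 1)) (x - 1) 0 = pvF w.reverse x := by
  induction w using List.reverseRecOn with
  | nil =>
    simp only [List.foldl_nil]
    refine ⟨by simp, ?_⟩
    intro x h1 h2
    rw [PySem.List.pyRange_of_pos _ _ one_pos, PySem.List.pyGetD_of_nonneg _ _ (by omega)]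
    have hcnt : (if (1 : Int) < (n : Int) + 1 then (((n : Int) + 1 - 1 + 1 - 1) / 1).toNat else 0) = n := by
      split <;> omega
    rw [hcnt, PySem.List.getD_map_range _ _ _ _ (by omega)]
    simp [pvF]
    omega
  | append_singleton w i ihfull =>
    have hw' : ∀ j ∈ w, 1 ≤ j ∧ j ≤ (n : Int) - 1 := fun j hj => hw j (by simp [hj])
    obtain ⟨hlen, ih⟩ := ihfull hw'
    have hi : 1 ≤ i ∧ i ≤ (n : Int) - 1 := hw i (by simp)
    rw [List.foldl_append]
    simp only [List.foldl_cons, List.foldl_nil]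
    set Pw := w.foldl
        (fun P i =>
          let a := PySem.List.pyGetD P (i - 1) 0
          let b := PySem.List.pyGetD P i 0
          PySem.List.pySetD (PySem.List.pySetD P (i - 1) b) i a)
        (PySem.List.pyRange 1 ((n : Int) + 1) 1) with hPw
    have hstep : (PySem.List.pySetD (PySem.List.pySetD Pw (i - 1) (PySem.List.pyGetD Pw i 0)) i
          (PySem.List.pyGetD Pw (i - 1) 0))
        = (Pw.set (i.toNat - 1) (Pw.getD i.toNat 0)).set i.toNat (Pw.getD (i.toNat - 1) 0) := by
      rw [PySem.List.pySetD_of_nonneg _ _ (by omega), PySem.List.pySetD_of_nonneg _ _ (by omega),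
        PySem.List.pyGetD_of_nonneg _ _ (by omega), PySem.List.pyGetD_of_nonneg _ _ (by omega)]
      have : ((i : Int) - 1).toNat = i.toNat - 1 := by omega
      rw [this]
    rw [hstep]
    constructor
    · simp [hlen]
    · intro x h1 h2
      rw [PySem.List.pyGetD_of_nonneg _ _ (by omega)]
      rw [swap_getD n i hi Pw hlen x h1 h2]
      have hb := pv_s_bounds (n := (n : Int)) hi ⟨h1, h2⟩
      have := ih (pv_s i x) hb.1 hb.2
      rw [PySem.List.pyGetD_of_nonneg _ _ (by omega)] at this
      rw [this, List.reverse_append]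
      rfl

-- ---------- the staircase list ----------

theorem pvStaircase_nodup (mu : List Int) : (pvStaircase mu).Nodup := by
  unfold pvStaircase
  rw [List.nodup_flatMap]
  constructor
  · intro i0 _
    refine List.Nodup.map ?_ ?_
    · intro a b h; simpa using h
    · have := PySem.List.pyRange_of_pos 1 (1 + mu.getD i0 0) (s := 1) one_pos
      rw [this]
      refine List.Nodup.map ?_ (List.nodup_range)
      intro a b h; simpa using h
  · refine List.Pairwise.imp ?_ (List.pairwise_lt_range)
    intro a b hab
    simp only [Function.onFun, List.disjoint_left]
    intro p hp hq
    simp only [List.mem_map] at hp hq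
    obtain ⟨j, _, rfl⟩ := hp
    obtain ⟨j', _, h⟩ := hq
    have : ((a : Int) + 1) = (b : Int) + 1 := by
      have := congrArg Prod.fst h; simpa using this.symm
    omega

theorem pvStaircase_mem {mu : List Int} {p : Int × Int} (hp : p ∈ pvStaircase mu) :
    1 ≤ p.1 ∧ p.1 ≤ (mu.length : Int) ∧ 1 ≤ p.2 := by
  unfold pvStaircase at hp
  simp only [List.mem_flatMap, List.mem_map, List.mem_range] at hp
  obtain ⟨i0, hi0, j, hj, rfl⟩ := hp
  have := PySem.List.mem_pyRange_one.mp hj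
  refine ⟨by simp, by simp; omega, by simp; omega⟩

theorem pvCells_pos (alpha : List Int) :
    ∀ p ∈ pvCells alpha, 1 ≤ p.1 ∧ 1 ≤ p.2 := by
  intro p hp
  unfold pvCells at hp
  simp only [List.mem_map] at hp
  obtain ⟨q, hq, rfl⟩ := hp
  have hb := sorting_word_bounds alpha
  have hbr : ∀ i ∈ (sorting_permutation alpha).reverse, 1 ≤ i ∧ i ≤ (alpha.length : Int) - 1 :=
    fun i hi => hb i (List.mem_reverse.mp hi)
  have hq' := pvStaircase_mem hq
  exact ⟨pvF_pos _ hbr hq'.1, pvF_pos _ hbr hq'.2.2⟩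

-- ---------- counting lemmas ----------

theorem incr_fold_spec (ks : List Int) (arr : List Int)
    (h : ∀ k ∈ ks, 1 ≤ k ∧ k ≤ (arr.length : Int)) :
    (ks.foldl (fun arr k => pvIncr arr (k - 1)) arr).length = arr.length
    ∧ ∀ m : Nat, m < arr.length →
        (ks.foldl (fun arr k => pvIncr arr (k - 1)) arr).getD m 0
          = arr.getD m 0 + (ks.count ((m : Int) + 1) : Int) := by
  induction ks generalizing arr with
  | nil => simp
  | cons k ks ih =>
    obtain ⟨hk1, hk2⟩ := h k List.mem_cons_self
    have hlen : (pvIncr arr (k - 1)).length = arr.length := by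
      simp [pvIncr, PySem.List.length_pySetD]
    have h' : ∀ k' ∈ ks, 1 ≤ k' ∧ k' ≤ ((pvIncr arr (k - 1)).length : Int) := by
      rw [hlen]; exact fun k' hk' => h k' (List.mem_cons_of_mem _ hk')
    obtain ⟨ihlen, ihget⟩ := ih (pvIncr arr (k - 1)) h'
    rw [List.foldl_cons]
    refine ⟨by rw [ihlen, hlen], ?_⟩
    intro m hm
    rw [ihget m (by omega)]
    have hincr : (pvIncr arr (k - 1)).getD m 0
        = arr.getD m 0 + (if k = (m : Int) + 1 then 1 else 0) := by
      unfold pvIncr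
      rw [PySem.List.pySetD_of_nonneg _ _ (by omega), PySem.List.pyGetD_of_nonneg _ _ (by omega)]
      have hkm : ((k - 1).toNat = m) ↔ (k = (m : Int) + 1) := by omega
      simp only [List.getD_eq_getElem?_getD, List.getElem?_set]
      by_cases h1 : (k - 1).toNat = m
      · rw [if_pos h1, if_pos (by omega), if_pos (hkm.mp h1)]
        subst h1
        rw [List.getElem?_eq_getElem (show (k - 1).toNat < arr.length by omega)]
        simp
      · rw [if_neg h1, if_neg (fun hc => h1 (hkm.mpr hc))]
        simp
    rw [hincr, List.count_cons]
    have : (k == (m : Int) + 1) = ((m : Int) + 1 == k) := by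
      by_cases h : k = (m : Int) + 1
      · simp [h]
      · simp [h]; omega
    by_cases h : k = (m : Int) + 1
    · simp [h]; omega
    · simp [h]

theorem trim_eq_take (arr : List Int) (M : Nat) (hM : M ≤ arr.length)
    (hz : ∀ m : Nat, M ≤ m → m < arr.length → arr.getD m 0 = 0)
    (hnz : M = 0 ∨ arr.getD (M - 1) 0 ≠ 0) :
    pvTrim arr = arr.take M := by
  unfold pvTrim
  have hsplit : arr = arr.take M ++ arr.drop M := (List.take_append_drop M arr).symm
  have hdz : ∀ x ∈ arr.drop M, x = (0 : Int) := by
    intro x hx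
    rw [List.mem_iff_getElem] at hx
    obtain ⟨j, hj, rfl⟩ := hx
    have hlen : (arr.drop M).length = arr.length - M := by simp
    have : arr.drop M = arr.drop M := rfl
    rw [List.getElem_drop]
    have := hz (M + j) (by omega) (by have := hj; simp at this; omega)
    rw [List.getD_eq_getElem?_getD, List.getElem?_eq_getElem (by simp at hj; omega)] at this
    simpa using this
  conv_lhs => rw [hsplit]
  rw [List.reverse_append, List.dropWhile_append]
  have hrevz : ∀ x ∈ (arr.drop M).reverse, (fun x => x == (0:Int)) x = true := by
    intro x hx; simpa using hdz x (List.mem_reverse.mp hx)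
  rw [List.dropWhile_eq_nil_iff.mpr (by intro x hx; exact hrevz x hx)]
  simp only [List.isEmpty_nil, if_pos]
  by_cases hM0 : M = 0
  · subst hM0
    have : ∀ x ∈ (arr.take 0).reverse, (fun x => x == (0:Int)) x = true := by simp
    simp
  · have hne : arr.getD (M - 1) 0 ≠ 0 := by
      rcases hnz with h0 | h; · omega
      · exact h
    have htake : arr.take M = arr.take (M - 1) ++ [arr[M-1]'(by omega)] := by
      have h1 : arr.take M = arr.take ((M - 1) + 1) := by congr 1; omega
      rw [h1, List.take_add_one, List.getElem?_eq_getElem (by omega)]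
      rfl
    rw [htake, List.reverse_append]
    simp only [List.reverse_singleton, List.singleton_append]
    rw [List.dropWhile_cons_of_neg (by
      rw [List.getD_eq_getElem?_getD, List.getElem?_eq_getElem (by omega)] at hne
      simpa using hne)]
    simp [List.reverse_cons]

-- the maximum value of a nonempty Int list is determined by membership alone
theorem max?_eq_of_same_mem (l₁ l₂ : List Int) (h : ∀ x : Int, x ∈ l₁ ↔ x ∈ l₂) :
    ((PySem.List.max? l₁ (fun x => x)).getD 0) = ((PySem.List.max? l₂ (fun x => x)).getD 0) := by
  cases h1 : PySem.List.max? l₁ (fun x => x) with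
  | none =>
    rw [PySem.List.max?_eq_none_iff] at h1
    cases h2 : PySem.List.max? l₂ (fun x => x) with
    | none => rfl
    | some m =>
      have := PySem.List.max?_mem h2
      rw [← h] at this
      simp [h1] at this
  | some m =>
    have hm := PySem.List.max?_mem h1
    cases h2 : PySem.List.max? l₂ (fun x => x) with
    | none =>
      rw [PySem.List.max?_eq_none_iff] at h2
      rw [h] at hm
      simp [h2] at hm
    | some m' =>
      have hm' := PySem.List.max?_mem h2
      have h12 := PySem.List.max?_isMax h1
      have h21 := PySem.List.max?_isMax h2
      simp only [Option.getD_some]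
      exact le_antisymm (h21 m ((h m).mp hm)) (h12 m' ((h m').mpr hm'))



-- the array-and-trim computation of A over a key list equals pvHalf
theorem arr_half (ks : List Int) (N : Nat)
    (h : ∀ k ∈ ks, 1 ≤ k ∧ k ≤ (N : Int)) :
    pvTrim (ks.foldl (fun arr k => pvIncr arr (k - 1)) (List.replicate N 0)) = pvHalf ks := by
  have hlen0 : (List.replicate N (0 : Int)).length = N := by simp
  obtain ⟨hlen, hget⟩ := incr_fold_spec ks (List.replicate N 0) (by rw [hlen0]; exact h)
  set arr := ks.foldl (fun arr k => pvIncr arr (k - 1)) (List.replicate N 0) with harr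
  have hgetv : ∀ m : Nat, m < N → arr.getD m 0 = (ks.count ((m : Int) + 1) : Int) := by
    intro m hm
    rw [hget m (by omega)]
    simp
  set Mr : Int := (PySem.List.max? ks (fun x => x)).getD 0 with hMr
  have hMr0 : 0 ≤ Mr := by
    cases hx : PySem.List.max? ks (fun x => x) with
    | none => simp [hMr, hx]
    | some m =>
      have := (h m (PySem.List.max?_mem hx)).1
      simp [hMr, hx]; omega
  have hMrN : Mr ≤ (N : Int) := by
    cases hx : PySem.List.max? ks (fun x => x) with
    | none => simp [hMr, hx]
    | some m =>
      have := (h m (PySem.List.max?_mem hx)).2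
      simp [hMr, hx]; omega
  have hmax : ∀ k ∈ ks, k ≤ Mr := by
    intro k hk
    cases hx : PySem.List.max? ks (fun x => x) with
    | none => rw [PySem.List.max?_eq_none_iff] at hx; simp [hx] at hk
    | some m =>
      have := PySem.List.max?_isMax hx k hk
      simp [hMr, hx]; omega
  have htrim : pvTrim arr = arr.take Mr.toNat := by
    refine trim_eq_take arr Mr.toNat (by omega) ?_ ?_
    · intro m hm1 hm2
      rw [hgetv m (by omega)]
      have : ((m : Int) + 1) ∉ ks := fun hc => by have := hmax _ hc; omega
      simp [List.count_eq_zero.mpr this]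
    · cases hx : PySem.List.max? ks (fun x => x) with
      | none => left; simp [hMr, hx]
      | some m =>
        right
        have hmem := PySem.List.max?_mem hx
        have hm1 : 1 ≤ m := (h m hmem).1
        have hMm : Mr = m := by simp [hMr, hx]
        rw [hgetv (Mr.toNat - 1) (by omega)]
        have : ((Mr.toNat - 1 : Nat) : Int) + 1 = m := by omega
        rw [this]
        have := List.count_pos_iff.mpr hmem
        omega
  rw [htrim]
  unfold pvHalf
  rw [← hMr]
  refine List.ext_getElem (by simp; omega) ?_
  intro m h1 h2
  simp only [List.getElem_take, List.getElem_map, List.getElem_range]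
  have hmN : m < N := by simp at h1; omega
  have := hgetv m hmN
  rw [List.getD_eq_getElem?_getD, List.getElem?_eq_getElem (by omega)] at this
  simpa using this

-- the dict computation of B over a key list equals pvHalf
theorem dict_half (ks : List Int) (h : ∀ k ∈ ks, 1 ≤ k) :
    ((PySem.List.pyRange 1
        ((if (PySem.Dict.counter ks).size = 0 then (0 : Int)
          else (PySem.List.max? (PySem.Dict.counter ks).keys (fun x => x)).getD 0) + 1) 1).map
      (fun k => (PySem.Dict.counter ks).getD k 0)) = pvHalf ks := by
  set Mr : Int := (PySem.List.max? ks (fun x => x)).getD 0 with hMr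
  have hkeys : (PySem.Dict.counter ks).keys = PySem.Set.ofList ks := PySem.Dict.keys_counter ks
  have hra : (if (PySem.Dict.counter ks).size = 0 then (0 : Int)
      else (PySem.List.max? (PySem.Dict.counter ks).keys (fun x => x)).getD 0) = Mr := by
    have hsize : (PySem.Dict.counter ks).size = (PySem.Dict.counter ks).keys.length := by
      simp [PySem.Dict.size, PySem.Dict.keys]
    by_cases hks : ks = []
    · subst hks
      have h0 : (PySem.Dict.counter ([] : List Int)).size = 0 := by rfl
      rw [if_pos h0]
      have hnone : PySem.List.max? ([] : List Int) (fun x => x) = none := rfl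
      simp [hMr, hnone]
    · have hne : (PySem.Dict.counter ks).keys ≠ [] := by
        rw [hkeys]
        obtain ⟨k, ks', rfl⟩ := List.exists_cons_of_ne_nil hks
        intro hc
        have : k ∈ PySem.Set.ofList (k :: ks') := (PySem.Set.mem_ofList _ _).mpr List.mem_cons_self
        simp [hc] at this
      rw [if_neg (by rw [hsize]; simpa using hne)]
      rw [hkeys]
      exact max?_eq_of_same_mem _ _ (fun x => PySem.Set.mem_ofList ks x)
  rw [hra]
  have hMr0 : 0 ≤ Mr := by
    cases hx : PySem.List.max? ks (fun x => x) with
    | none => simp [hMr, hx]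
    | some m =>
      have := h m (PySem.List.max?_mem hx)
      simp [hMr, hx]; omega
  rw [PySem.List.pyRange_of_pos _ _ one_pos]
  have hcnt : (if (1 : Int) < Mr + 1 then ((Mr + 1 - 1 + 1 - 1) / 1).toNat else 0) = Mr.toNat := by
    split <;> omega
  rw [hcnt, List.map_map]
  unfold pvHalf
  rw [← hMr]
  refine List.map_congr_left ?_
  intro m hm
  simp only [Function.comp_apply]
  have : (1 : Int) + 1 * (m : Int) = (m : Int) + 1 := by ring
  rw [this, PySem.Dict.getD_counter]

-- ---------- each port equals the canonical form ----------

theorem foldl_if_filter {β : Type} (l : List (Int × Int)) (f : β → (Int × Int) → β) (init : β) :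
    l.foldl (fun acc p => if p.1 ≤ p.2 then f acc p else acc) init
      = (l.filter (fun p => decide (p.1 ≤ p.2))).foldl f init := by
  rw [List.foldl_filter]
  exact PySem.List.foldl_congr_mem _ _ _ _ (by intro acc x _; simp)

theorem A_eq_canon (alpha : List Int) (pad : Bool) :
    symmetric_halves alpha pad = pvOut alpha pad := by
  simp only [symmetric_halves, pvOut]
  rw [set_fold_eq_map _ _ (pvStaircase_nodup _)]
  rw [show (pvStaircase (PySem.List.sorted alpha (fun x => x) true)).map
      (fun p => (pvF (sorting_permutation alpha).reverse p.1,
                 pvF (sorting_permutation alpha).reverse p.2)) = pvCells alpha from rfl]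
  set C := pvCells alpha with hC
  set nI : Int := (PySem.List.max? ((0 : Int) :: C.map (fun p => max p.1 p.2)) (fun x => x)).getD 0 with hnI
  have hmaxfacts : ∀ y ∈ ((0 : Int) :: C.map (fun p => max p.1 p.2)), y ≤ nI := by
    cases hx : PySem.List.max? ((0 : Int) :: C.map (fun p => max p.1 p.2)) (fun x => x) with
    | none => rw [PySem.List.max?_eq_none_iff] at hx; simp at hx
    | some m =>
      intro y hy
      have := PySem.List.max?_isMax hx y hy
      simp [hnI, hx]; omega
  have hn0 : 0 ≤ nI := hmaxfacts 0 List.mem_cons_self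
  have hbound : ∀ p ∈ C, p.1 ≤ nI ∧ p.2 ≤ nI := by
    intro p hp
    have := hmaxfacts (max p.1 p.2) (List.mem_cons_of_mem _ (List.mem_map_of_mem hp))
    omega
  have hsplitf : (fun (rc : List Int × List Int) (p : Int × Int) =>
        if p.1 ≤ p.2 then (pvIncr rc.1 (p.1 - 1), pvIncr rc.2 (p.2 - 1)) else rc)
      = fun rc p => ((fun arr q => if q.1 ≤ q.2 then pvIncr arr (q.1 - 1) else arr) rc.1 p,
                     (fun arr q => if q.1 ≤ q.2 then pvIncr arr (q.2 - 1) else arr) rc.2 p) := by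
    funext rc p
    by_cases h : p.1 ≤ p.2
    · simp [h]
    · simp [h]
  rw [hsplitf]
  beta_reduce
  rw [PySem.List.foldl_prod_mk
    (f := fun arr (q : Int × Int) => if q.1 ≤ q.2 then pvIncr arr (q.1 - 1) else arr)
    (g := fun arr (q : Int × Int) => if q.1 ≤ q.2 then pvIncr arr (q.2 - 1) else arr)]
  rw [foldl_if_filter, foldl_if_filter]
  rw [List.foldl_map (f := fun p : Int × Int => p.1)
        (g := fun arr k => pvIncr arr (k - 1)) |>.symm]
  rw [List.foldl_map (f := fun p : Int × Int => p.2)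
        (g := fun arr k => pvIncr arr (k - 1)) |>.symm]
  have hks1 : ((C.filter (fun p => decide (p.1 ≤ p.2))).map (fun p : Int × Int => p.1))
      = pvKs alpha (fun p => p.1) := rfl
  have hks2 : ((C.filter (fun p => decide (p.1 ≤ p.2))).map (fun p : Int × Int => p.2))
      = pvKs alpha (fun p => p.2) := rfl
  rw [hks1, hks2]
  have hmem : ∀ q ∈ C.filter (fun p => decide (p.1 ≤ p.2)), q ∈ C := by
    intro q hq; exact List.mem_of_mem_filter hq
  rw [arr_half _ nI.toNat (by
      intro k hk
      simp only [pvKs, ← hC, List.mem_map] at hk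
      obtain ⟨q, hq, rfl⟩ := hk
      have h1 := pvCells_pos alpha q (hmem q hq)
      have h2 := (hbound q (hmem q hq)).1
      constructor; · omega
      · omega)]
  rw [arr_half _ nI.toNat (by
      intro k hk
      simp only [pvKs, ← hC, List.mem_map] at hk
      obtain ⟨q, hq, rfl⟩ := hk
      have h1 := pvCells_pos alpha q (hmem q hq)
      have h2 := (hbound q (hmem q hq)).2
      constructor; · omega
      · omega)]

theorem B_eq_canon (alpha : List Int) (pad : Bool) :
    symmetric_halves_alt alpha pad = pvOut alpha pad := by
  simp only [symmetric_halves_alt, pvOut]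
  set n := alpha.length with hn
  set w := sorting_permutation alpha with hw
  set mu := PySem.List.sorted alpha (fun x => x) true with hmu
  have hwb := sorting_word_bounds alpha
  obtain ⟨hPlen, hPget⟩ := P_fold_spec n w (by rw [hn]; exact hwb)
  set P := w.foldl
      (fun P i =>
        let a := PySem.List.pyGetD P (i - 1) 0
        let b := PySem.List.pyGetD P i 0
        PySem.List.pySetD (PySem.List.pySetD P (i - 1) b) i a)
      (PySem.List.pyRange 1 ((n : Int) + 1) 1) with hP
  have hmulen : mu.length = n := PySem.List.length_sorted alpha _ true
  -- the nested loops are a fold of the dict step over the mapped staircase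
  have hnest : (PySem.List.pyRange 1 ((n : Int) + 1) 1).foldl
      (fun (rc : PySem.Dict Int Int × PySem.Dict Int Int) i =>
        let a := PySem.List.pyGetD P (i - 1) 0
        (PySem.List.pyRange 1 (1 + PySem.List.pyGetD mu (i - 1) 0) 1).foldl
          (fun rc j =>
            let b := if j ≤ (n : Int) then PySem.List.pyGetD P (j - 1) 0 else j
            if a ≤ b then (rc.1.modify a 0 (· + 1), rc.2.modify b 0 (· + 1)) else rc)
          rc)
      (PySem.Dict.empty, PySem.Dict.empty)
      = (pvCells alpha).foldl
          (fun (rc : PySem.Dict Int Int × PySem.Dict Int Int) q =>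
            if q.1 ≤ q.2 then (rc.1.modify q.1 0 (· + 1), rc.2.modify q.2 0 (· + 1)) else rc)
          (PySem.Dict.empty, PySem.Dict.empty) := by
    rw [show pvCells alpha = (pvStaircase mu).map
        (fun p => (pvF w.reverse p.1, pvF w.reverse p.2)) from rfl]
    rw [List.foldl_map]
    unfold pvStaircase
    rw [List.foldl_flatMap, hmulen]
    rw [PySem.List.pyRange_of_pos 1 ((n : Int) + 1) one_pos]
    have hcnt : (if (1 : Int) < (n : Int) + 1 then (((n : Int) + 1 - 1 + 1 - 1) / 1).toNat else 0) = n := by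
      split <;> omega
    rw [hcnt, List.foldl_map]
    refine PySem.List.foldl_congr_mem _ _ _ _ ?_
    intro rc i0 hi0
    have hi0n : i0 < n := List.mem_range.mp hi0
    have hidx : (1 : Int) + 1 * (i0 : Int) - 1 = ((i0 : Nat) : Int) := by ring
    have hgmu : PySem.List.pyGetD mu ((1 : Int) + 1 * (i0 : Int) - 1) 0 = mu.getD i0 0 := by
      rw [hidx, PySem.List.pyGetD_natCast]
    simp only [hgmu]
    rw [List.foldl_map]
    refine PySem.List.foldl_congr_mem _ _ _ _ ?_
    intro rc2 j hj
    have hj1 : 1 ≤ j := (PySem.List.mem_pyRange_one.mp hj).1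
    have ha : PySem.List.pyGetD P ((1 : Int) + 1 * (i0 : Int) - 1) 0
        = pvF w.reverse ((i0 : Int) + 1) := by
      have := hPget ((i0 : Int) + 1) (by omega) (by omega)
      rw [← this]
      congr 1
      ring
    have hb : (if j ≤ (n : Int) then PySem.List.pyGetD P (j - 1) 0 else j)
        = pvF w.reverse j := by
      by_cases hjn : j ≤ (n : Int)
      · rw [if_pos hjn, hPget j hj1 hjn]
      · rw [if_neg hjn]
        refine (pvF_fix (n := (n : Int)) _ ?_ (by omega)).symm
        intro i hi
        exact hwb i (List.mem_reverse.mp hi)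
    simp only [ha, hb]
  rw [hnest]
  have hsplitf : (fun (rc : PySem.Dict Int Int × PySem.Dict Int Int) (q : Int × Int) =>
        if q.1 ≤ q.2 then (rc.1.modify q.1 0 (· + 1), rc.2.modify q.2 0 (· + 1)) else rc)
      = fun rc q => ((fun d (q : Int × Int) => if q.1 ≤ q.2 then d.modify q.1 0 (· + 1) else d) rc.1 q,
                     (fun d (q : Int × Int) => if q.1 ≤ q.2 then d.modify q.2 0 (· + 1) else d) rc.2 q) := by
    funext rc q
    by_cases h : q.1 ≤ q.2 <;> simp [h]
  rw [hsplitf]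
  rw [PySem.List.foldl_prod_mk
    (fun (d : PySem.Dict Int Int) (q : Int × Int) => if q.1 ≤ q.2 then d.modify q.1 0 (· + 1) else d)
    (fun (d : PySem.Dict Int Int) (q : Int × Int) => if q.1 ≤ q.2 then d.modify q.2 0 (· + 1) else d)
    (pvCells alpha) PySem.Dict.empty PySem.Dict.empty]
  rw [foldl_if_filter, foldl_if_filter]
  rw [List.foldl_map (f := fun p : Int × Int => p.1)
        (g := fun d k => PySem.Dict.modify d k 0 (· + 1)) |>.symm]
  rw [List.foldl_map (f := fun p : Int × Int => p.2)
        (g := fun d k => PySem.Dict.modify d k 0 (· + 1)) |>.symm]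
  rw [← PySem.Dict.counter_eq_foldl, ← PySem.Dict.counter_eq_foldl]
  have hmem : ∀ q ∈ (pvCells alpha).filter (fun p => decide (p.1 ≤ p.2)), q ∈ pvCells alpha :=
    fun q hq => List.mem_of_mem_filter hq
  have h1 : ∀ k ∈ ((pvCells alpha).filter (fun p => decide (p.1 ≤ p.2))).map (fun p : Int × Int => p.1), 1 ≤ k := by
    intro k hk
    simp only [List.mem_map] at hk
    obtain ⟨q, hq, rfl⟩ := hk
    exact (pvCells_pos alpha q (hmem q hq)).1
  have h2 : ∀ k ∈ ((pvCells alpha).filter (fun p => decide (p.1 ≤ p.2))).map (fun p : Int × Int => p.2), 1 ≤ k := by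
    intro k hk
    simp only [List.mem_map] at hk
    obtain ⟨q, hq, rfl⟩ := hk
    exact (pvCells_pos alpha q (hmem q hq)).2
  rw [dict_half _ h1, dict_half _ h2]
  rfl

theorem symmetric_halves_spec' : ∀ (alpha : List Int) (pad : Bool),
    symmetric_halves alpha pad = symmetric_halves_alt alpha pad := by
  intro alpha pad
  rw [A_eq_canon, B_eq_canon]

-- ===== VERDICT (by name: the statement is the Claim_ definition above) =====
theorem symmetric_halves_spec : Claim_equal_symmetric_halves := by
  intro alpha pad _
  unfold Spec_symmetric_halves
  exact symmetric_halves_spec' alpha pad
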